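-- pv_equiv track=rewrite | github.com/DanielRizvi/codeforces | CreatingTheContest.py | longest_subsequence_length
-- ===== SOURCE A (Python) =====
-- def longest_subsequence_length(arr):
--     n = len(arr)
--     ans = 1
--     temp = 1
--
--     for i in range(1, n):
--         if arr[i - 1] * 2 >= arr[i]:
--             temp += 1
--         else:
--             ans = max(ans, temp)
--             temp = 1
--     return max(ans, temp)
-- ===== SOURCE B (Python) =====
-- def longest_subsequence_length(arr):
--     n = len(arr)
--     breaks = [i for i in range(1, n) if arr[i - 1] * 2 < arr[i]]
--     boundaries = [0] + breaks + [n]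
--     ans = max(b - a for a, b in zip(boundaries, boundaries[1:]))
--     return max(ans, 1)
-- ===== Notes on version B (the rewrite author's own statement) =====
-- stated objective: alternative
-- what changed: Replaced A's online best/current accumulator pair with a two-phase pass: collect break indices where arr[i-1]*2 < arr[i], form boundaries [0]+breaks+[n], and take the maximum consecutive-boundary difference (floored at 1).
import Mathlib
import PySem

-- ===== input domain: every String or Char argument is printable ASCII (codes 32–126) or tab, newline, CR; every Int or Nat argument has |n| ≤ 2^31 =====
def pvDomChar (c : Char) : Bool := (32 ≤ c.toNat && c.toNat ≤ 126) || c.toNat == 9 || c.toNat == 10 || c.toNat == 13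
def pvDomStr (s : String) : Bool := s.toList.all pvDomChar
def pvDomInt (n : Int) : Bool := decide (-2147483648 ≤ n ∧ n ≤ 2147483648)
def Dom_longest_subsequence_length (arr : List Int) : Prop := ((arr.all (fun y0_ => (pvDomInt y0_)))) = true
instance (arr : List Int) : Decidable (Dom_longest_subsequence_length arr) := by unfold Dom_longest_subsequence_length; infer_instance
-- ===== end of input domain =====

-- B replaces A's online best/current-run accumulator with a two-phase pass (collect break
-- indices, then take the largest gap between consecutive boundaries); same O(n) cost.

-- ===== PORT A =====
-- literal port of A: fold over range(1, n) carrying (ans, temp); indices i-1, i are always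
-- in range, so pyGetD's default is never used.
def longest_subsequence_length (arr : List Int) : Int :=
  let n : Int := arr.length
  let st := (PySem.List.pyRange 1 n 1).foldl
    (fun (st : Int × Int) i =>
      if PySem.List.pyGetD arr (i - 1) 0 * 2 ≥ PySem.List.pyGetD arr i 0 then
        (st.1, st.2 + 1)
      else
        (max st.1 st.2, 1))
    (1, 1)
  max st.1 st.2

-- ===== PORT B =====
-- literal port of Source B; the `[] => 0` arm of Python's max(...) is unreachable
-- (boundaries always has at least two elements, so diffs is nonempty).
def longest_subsequence_length_alt (arr : List Int) : Int :=
  let n : Int := arr.length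
  let breaks := (PySem.List.pyRange 1 n 1).filter
    (fun i => decide (PySem.List.pyGetD arr (i - 1) 0 * 2 < PySem.List.pyGetD arr i 0))
  let boundaries := 0 :: (breaks ++ [n])
  let diffs := (boundaries.zip boundaries.tail).map (fun p => p.2 - p.1)
  let ans : Int := match diffs with
    | d :: ds => ds.foldl max d
    | [] => 0
  max ans 1

-- ===== PRECONDITION & SPEC =====
def Spec_longest_subsequence_length (arr : List Int) (out : Int) : Prop := out = longest_subsequence_length_alt arr
instance (arr : List Int) (out : Int) : Decidable (Spec_longest_subsequence_length arr out) := by unfold Spec_longest_subsequence_length; infer_instance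

-- ===== CLAIM (what is proved, stated in full; the proofs are below) =====
def Claim_equal_longest_subsequence_length : Prop := ∀ (arr : List Int), Dom_longest_subsequence_length arr → Spec_longest_subsequence_length arr (longest_subsequence_length arr)

-- ===== LEMMAS AND PROOFS =====

-- max of consecutive differences of prev :: xs (xs nonempty in all uses)
def maxdiff : Int → List Int → Int
  | _, [] => 0
  | prev, [x] => x - prev
  | prev, x :: y :: xs => max (x - prev) (maxdiff x (y :: xs))

lemma maxdiff_cons (prev x : Int) (l : List Int) (h : l ≠ []) :
    maxdiff prev (x :: l) = max (x - prev) (maxdiff x l) := by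
  cases l with
  | nil => exact absurd rfl h
  | cons y ys => rfl

lemma foldl_max_init (ds : List Int) : ∀ (a d : Int),
    List.foldl max (max a d) ds = max a (List.foldl max d ds) := by
  induction ds with
  | nil => intro a d; rfl
  | cons e ds ih =>
      intro a d
      show List.foldl max (max (max a d) e) ds = max a (List.foldl max (max d e) ds)
      rw [max_assoc, ih]

-- B's head-seeded fold over consecutive differences is maxdiff
lemma fold_diffs_eq_maxdiff : ∀ (xs : List Int) (prev x : Int),
    (match ((prev :: x :: xs).zip (x :: xs)).map (fun p => p.2 - p.1) with
      | d :: ds => ds.foldl max d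
      | [] => (0 : Int))
    = maxdiff prev (x :: xs) := by
  intro xs
  induction xs with
  | nil => intro prev x; rfl
  | cons y ys ih =>
      intro prev x
      show List.foldl max (x - prev) (((x :: y :: ys).zip (y :: ys)).map (fun p => p.2 - p.1))
            = maxdiff prev (x :: y :: ys)
      have hz : ((x :: y :: ys).zip (y :: ys)).map (fun p => p.2 - p.1)
          = (y - x) :: ((y :: ys).zip ys).map (fun p => p.2 - p.1) := by
        cases ys <;> rfl
      rw [hz]
      show List.foldl max (max (x - prev) (y - x)) (((y :: ys).zip ys).map (fun p => p.2 - p.1))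
            = maxdiff prev (x :: y :: ys)
      rw [foldl_max_init, maxdiff_cons prev x (y :: ys) (by simp)]
      congr 1
      exact ih x y

-- the core invariant: A's fold over indices p..p+k-1 with current run length p - prev and
-- best-so-far a computes max a (maxdiff over break boundaries ending at p + k)
lemma key (c : Int → Bool) : ∀ (k : Nat) (p prev a : Int),
    (max ((PySem.List.pyRange p (p + k) 1).foldl
        (fun (st : Int × Int) i => if c i then (st.1, st.2 + 1) else (max st.1 st.2, 1))
        (a, p - prev)).1
      ((PySem.List.pyRange p (p + k) 1).foldl
        (fun (st : Int × Int) i => if c i then (st.1, st.2 + 1) else (max st.1 st.2, 1))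
        (a, p - prev)).2)
    = max a (maxdiff prev (((PySem.List.pyRange p (p + k) 1).filter (fun i => !(c i))) ++ [p + k])) := by
  intro k
  induction k with
  | zero =>
      intro p prev a
      rw [PySem.List.pyRange_one_eq_nil (by simp)]
      simp [maxdiff]
  | succ k ih =>
      intro p prev a
      have hcons : PySem.List.pyRange p (p + ((k : Nat) + 1 : Nat)) 1 = p :: PySem.List.pyRange (p + 1) (p + ((k : Nat) + 1 : Nat)) 1 :=
        PySem.List.pyRange_one_cons (by push_cast; omega)
      have hend : p + (((k : Nat) + 1 : Nat) : Int) = (p + 1) + (k : Int) := by push_cast; omega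
      rw [hcons]
      cases hc : c p with
      | true =>
          simp only [List.foldl_cons, List.filter_cons, hc, reduceIte, Bool.not_true]
          rw [show ((a, p - prev).1, (a, p - prev).2 + 1) = (a, (p + 1) - prev) from by
            simp; omega]
          rw [hend]
          exact ih (p + 1) prev a
      | false =>
          simp only [List.foldl_cons, List.filter_cons, hc, reduceIte, Bool.not_false,
            Bool.false_eq_true]
          rw [show (max (a, p - prev).1 (a, p - prev).2, (1 : Int)) = (max a (p - prev), (p + 1) - p) from by
            simp]
          rw [hend]
          rw [ih (p + 1) p (max a (p - prev))]
          rw [List.cons_append, maxdiff_cons prev p _ (by simp)]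
          rw [max_assoc]

-- rewrite A's Prop-condition fold as the Bool fold used in `key`
lemma stepA_eq (arr : List Int) :
    (fun (st : Int × Int) i =>
      if PySem.List.pyGetD arr (i - 1) 0 * 2 ≥ PySem.List.pyGetD arr i 0 then
        (st.1, st.2 + 1)
      else (max st.1 st.2, 1))
    = (fun (st : Int × Int) i =>
        if (fun j => decide (PySem.List.pyGetD arr (j - 1) 0 * 2 ≥ PySem.List.pyGetD arr j 0)) i then
          (st.1, st.2 + 1)
        else (max st.1 st.2, 1)) := by
  funext st i
  simp

lemma breaks_eq (arr : List Int) (l : List Int) :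
    l.filter (fun i => decide (PySem.List.pyGetD arr (i - 1) 0 * 2 < PySem.List.pyGetD arr i 0))
    = l.filter (fun i => !((fun j => decide (PySem.List.pyGetD arr (j - 1) 0 * 2 ≥ PySem.List.pyGetD arr j 0)) i)) := by
  apply List.filter_congr
  intro x _
  simp only [← decide_not]
  exact decide_eq_decide.mpr (by omega)

-- ===== VERDICT (by name: the statement is the Claim_ definition above) =====
theorem longest_subsequence_length_spec : Claim_equal_longest_subsequence_length := by
  intro arr _
  unfold Spec_longest_subsequence_length longest_subsequence_length longest_subsequence_length_alt
  cases arr with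
  | nil => decide
  | cons x xs =>
      simp only []
      set c : Int → Bool := fun j => decide (PySem.List.pyGetD (x :: xs) (j - 1) 0 * 2 ≥ PySem.List.pyGetD (x :: xs) j 0) with hc
      have hn : ((x :: xs).length : Int) = 1 + (xs.length : Int) := by simp; omega
      rw [stepA_eq (x :: xs), breaks_eq (x :: xs)]
      rw [← hc]
      rw [hn]
      have hk := key c xs.length 1 0 1
      rw [show (1 : Int) - 0 = 1 by norm_num] at hk
      rw [hk]
      generalize hL : List.filter (fun i => !c i) (PySem.List.pyRange 1 (1 + (xs.length : Int)) 1) ++ [1 + (xs.length : Int)] = L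
      cases L with
      | nil => exact absurd hL (by simp)
      | cons y ys =>
          rw [show (0 :: y :: ys).tail = y :: ys from rfl]
          rw [fold_diffs_eq_maxdiff ys 0 y]
          exact max_comm 1 _
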